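-- pv_equiv track=rewrite | github.com/vien10022003/LoreJourney | extracted_sprites/pack_sprites.py | calculate_atlas_size
-- ===== SOURCE A (Python) =====
-- def calculate_atlas_size(sprites_info):
--     """Tinh kich thuoc atlas toi uu"""
--     total_area = sum(info['width'] * info['height'] for info in sprites_info.values())
--
--     # Them 20% cho padding va waste space
--     total_area = int(total_area * 1.2)
--
--     # Tim kich thuoc vuong gan nhat (power of 2)
--     atlas_size = 2
--     while atlas_size * atlas_size < total_area:
--         atlas_size *= 2
--
--     # Gioi han toi da la 2048x2048
--     if atlas_size > 2048:
--         atlas_size = 2048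
--
--     return atlas_size
-- ===== SOURCE B (Python) =====
-- def calculate_atlas_size(sprites_info):
--     total_area = sum(info['width'] * info['height'] for info in sprites_info.values())
--     t = int(total_area * 1.2)
--     if t <= 4:
--         return 2
--     k = ((t - 1).bit_length() + 1) // 2
--     return 1 << min(k, 11)
-- ===== Notes on version B (the rewrite author's own statement) =====
-- stated objective: simpler
-- what changed: The doubling while-loop searching for the smallest power-of-two atlas side is replaced by a closed-form bit_length computation (k = ((t-1).bit_length()+1)//2, answer 1 << min(k,11)), with the same padded total area.
import Mathlib
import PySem

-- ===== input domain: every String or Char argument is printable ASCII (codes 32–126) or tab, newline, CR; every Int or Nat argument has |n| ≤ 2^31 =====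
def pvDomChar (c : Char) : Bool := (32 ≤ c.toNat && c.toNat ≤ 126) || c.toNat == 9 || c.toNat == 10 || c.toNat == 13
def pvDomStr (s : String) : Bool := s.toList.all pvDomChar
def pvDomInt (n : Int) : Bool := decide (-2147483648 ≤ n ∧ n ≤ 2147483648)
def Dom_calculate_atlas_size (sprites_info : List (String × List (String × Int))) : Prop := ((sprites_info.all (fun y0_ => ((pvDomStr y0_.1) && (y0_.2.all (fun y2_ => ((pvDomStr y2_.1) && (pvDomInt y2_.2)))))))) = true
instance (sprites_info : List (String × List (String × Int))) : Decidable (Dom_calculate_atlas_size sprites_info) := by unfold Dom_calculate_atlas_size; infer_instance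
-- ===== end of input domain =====

-- B replaces A's power-of-two doubling loop by a closed-form bit_length computation; same padded area.
-- Both Pythons compute `int(total_area * 1.2)` with a float multiply; both ports compute it as
-- (6*total).tdiv 5 (truncation towards zero, like int()). This is exact with respect to the RETURN
-- value: the result only depends on comparisons of the padded area with 4^k for k ≤ 11 (everything
-- above 2048^2 is capped to 2048, everything ≤ 4 gives 2), and in that range |t| < 2^53, where the
-- only float error is the representation of 1.2 (relative 2^-52, absolute < 1e-9 there); a flip of a
-- comparison would need an exact 6t/5 equal to 4^k + 1, impossible since 6t/5 ∈ ℤ forces it even.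

-- ===== PORT A =====
-- A's while loop `while atlas_size * atlas_size < total_area: atlas_size *= 2`, started at 2.
-- The fuel argument is only a totality guard: t.toNat + 1 iterations always suffice (atlasLoopA_eq).
def atlasLoopA (fuel : Nat) (t a : Int) : Int :=
  match fuel with
  | 0 => a
  | fuel + 1 => if a * a < t then atlasLoopA fuel t (a * 2) else a

def calculate_atlas_size (sprites_info : List (String × List (String × Int))) : Int :=
  -- sum(info['width'] * info['height'] for info in sprites_info.values())
  let total : Int := (PySem.Dict.ofList sprites_info).values.foldl
    (fun acc info => acc + (PySem.Dict.ofList info).getD "width" 0 * (PySem.Dict.ofList info).getD "height" 0) 0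
  let t : Int := Int.tdiv (6 * total) 5   -- int(total * 1.2), see header comment
  let a : Int := atlasLoopA (t.toNat + 1) t 2
  if a > 2048 then 2048 else a

-- ===== PORT B =====
def calculate_atlas_size_alt (sprites_info : List (String × List (String × Int))) : Int :=
  let total : Int := ((PySem.Dict.ofList sprites_info).values.map
    (fun info => (PySem.Dict.ofList info).getD "width" 0 * (PySem.Dict.ofList info).getD "height" 0)).sum
  let t : Int := Int.tdiv (6 * total) 5   -- int(total * 1.2), see header comment
  if t ≤ 4 then 2
  else (2 : Int) ^ (min ((PySem.Int.bitLength (t - 1) + 1) / 2) 11)   -- 1 << min(k, 11)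

-- ===== PRECONDITION & SPEC =====
-- A raises KeyError iff some value of the dict lacks a 'width' or 'height' key; exactly those inputs are excluded.
def Pre_calculate_atlas_size (sprites_info : List (String × List (String × Int))) : Prop :=
  ∀ info ∈ (PySem.Dict.ofList sprites_info).values,
    (PySem.Dict.ofList info).contains "width" = true ∧ (PySem.Dict.ofList info).contains "height" = true
instance (sprites_info : List (String × List (String × Int))) : Decidable (Pre_calculate_atlas_size sprites_info) := by unfold Pre_calculate_atlas_size; infer_instance

def pvWitness_calculate_atlas_size : (List (String × List (String × Int))) :=
  [("a", [("width", 100), ("height", 30)]), ("b", [("width", 7), ("height", 7)])]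

def Spec_calculate_atlas_size (sprites_info : List (String × List (String × Int))) (out : Int) : Prop := out = calculate_atlas_size_alt sprites_info
instance (sprites_info : List (String × List (String × Int))) (out : Int) : Decidable (Spec_calculate_atlas_size sprites_info out) := by unfold Spec_calculate_atlas_size; infer_instance

-- ===== CLAIM (what is proved, stated in full; the proofs are below) =====
def Claim_equal_calculate_atlas_size : Prop := ∀ (sprites_info : List (String × List (String × Int))), Dom_calculate_atlas_size sprites_info → Pre_calculate_atlas_size sprites_info → Spec_calculate_atlas_size sprites_info (calculate_atlas_size sprites_info)

-- ===== LEMMAS AND PROOFS =====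

-- the exponent B computes before the cap: the smallest k ≥ 1 with 4^k ≥ t
def padK (t : Int) : Nat := if t ≤ 4 then 1 else (PySem.Int.bitLength (t - 1) + 1) / 2

lemma padK_pos (t : Int) : 1 ≤ padK t := by
  unfold padK
  split_ifs with h
  · exact le_refl 1
  · have h1 : (4 : Int) ≤ t - 1 := by omega
    have h2 : 2 ^ 2 ≤ (t - 1).natAbs := by
      have : (4 : ℤ) ≤ (t - 1).natAbs := by
        rwa [Int.natAbs_of_nonneg (by omega)]
      exact_mod_cast this
    have h3 : 3 ≤ PySem.Int.bitLength (t - 1) := by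
      by_contra hc
      push Not at hc
      have hle : PySem.Int.bitLength (t - 1) ≤ 2 := by omega
      have := PySem.Int.lt_two_pow_bitLength (t - 1)
      have : (t - 1).natAbs < 2 ^ 2 :=
        lt_of_lt_of_le this (Nat.pow_le_pow_right (by norm_num) hle)
      omega
    omega

lemma padK_le_iff (t : Int) (j : Nat) (hj : 1 ≤ j) : padK t ≤ j ↔ t ≤ (4 : Int) ^ j := by
  unfold padK
  split_ifs with h
  · constructor
    · intro _
      calc t ≤ 4 := h
        _ = (4:Int) ^ 1 := by norm_num
        _ ≤ (4:Int) ^ j := pow_le_pow_right₀ (by norm_num) hj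
    · intro _; exact hj
  · push Not at h
    have hpos : (0 : Int) < t - 1 := by omega
    have hne : t - 1 ≠ 0 := by omega
    have habs : ((t - 1).natAbs : Int) = t - 1 := Int.natAbs_of_nonneg (by omega)
    have key : (t - 1).natAbs < 2 ^ (2 * j) ↔ PySem.Int.bitLength (t - 1) ≤ 2 * j := by
      constructor
      · intro hlt
        by_contra hc
        push Not at hc
        have h1 := PySem.Int.two_pow_bitLength_le (t - 1) hne
        have h2 : 2 ^ (2 * j) ≤ 2 ^ (PySem.Int.bitLength (t - 1) - 1) :=
          Nat.pow_le_pow_right (by norm_num) (by omega)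
        omega
      · intro hle
        have h1 := PySem.Int.lt_two_pow_bitLength (t - 1)
        have h2 : (2:Nat) ^ PySem.Int.bitLength (t - 1) ≤ 2 ^ (2 * j) :=
          Nat.pow_le_pow_right (by norm_num) hle
        omega
    have h4 : ((4 : Int) ^ j) = ((2 ^ (2 * j) : Nat) : Int) := by
      push_cast
      rw [pow_mul]
      norm_num
    constructor
    · intro hkj
      have : PySem.Int.bitLength (t - 1) ≤ 2 * j := by omega
      have := key.mpr this
      have : ((t - 1).natAbs : Int) < ((2 ^ (2 * j) : Nat) : Int) := by exact_mod_cast this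
      rw [habs] at this
      omega
    · intro hle
      have : ((t - 1).natAbs : Int) < ((2 ^ (2 * j) : Nat) : Int) := by
        rw [habs, ← h4]; omega
      have := key.mp (by exact_mod_cast this)
      omega

lemma four_pow_as_sq (j : Nat) : (2 : Int) ^ j * 2 ^ j = 4 ^ j := by
  rw [← mul_pow]; norm_num

lemma bitLength_le_toNat (n : Int) (hn : 1 ≤ n) : PySem.Int.bitLength n ≤ n.toNat := by
  have h1 := PySem.Int.two_pow_bitLength_le n (by omega)
  have h2 : PySem.Int.bitLength n - 1 < 2 ^ (PySem.Int.bitLength n - 1) :=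
    Nat.lt_two_pow_self
  omega

lemma padK_le (t : Int) : padK t ≤ t.toNat + 2 := by
  unfold padK
  split_ifs with h
  · omega
  · have := bitLength_le_toNat (t - 1) (by omega)
    omega

lemma atlasLoopA_eq (t : Int) : ∀ (f j : Nat), 1 ≤ j → ∀ (a : Int),
    a = (2:Int) ^ j → padK t ≤ j + f → atlasLoopA f t a = 2 ^ (max j (padK t)) := by
  intro f
  induction f with
  | zero =>
    intro j hj a heq hfuel
    have hK : padK t ≤ j := by omega
    rw [heq, Nat.max_eq_left hK]
    rfl
  | succ f ih =>
    intro j hj a heq hfuel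
    show (if a * a < t then atlasLoopA f t (a * 2) else a) = _
    by_cases hlt : a * a < t
    · have hjK : j < padK t := by
        by_contra hc
        push Not at hc
        have := (padK_le_iff t j hj).mp hc
        rw [heq, four_pow_as_sq] at hlt
        omega
      rw [if_pos hlt]
      have hstep : a * 2 = 2 ^ (j + 1) := by rw [heq, pow_succ]
      have := ih (j + 1) (by omega) (a * 2) hstep (by omega)
      rw [this, Nat.max_eq_right (by omega), Nat.max_eq_right (by omega)]
    · have hge : t ≤ (4:Int) ^ j := by
        rw [heq, four_pow_as_sq] at hlt
        omega
      have hK : padK t ≤ j := (padK_le_iff t j hj).mpr hge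
      rw [if_neg hlt, heq, Nat.max_eq_left hK]

lemma cap_eq (t : Int) :
    (if atlasLoopA (t.toNat + 1) t 2 > 2048 then (2048 : Int) else atlasLoopA (t.toNat + 1) t 2) =
      (2 : Int) ^ (min (padK t) 11) := by
  have hloop : atlasLoopA (t.toNat + 1) t 2 = 2 ^ (max 1 (padK t)) :=
    atlasLoopA_eq t (t.toNat + 1) 1 (le_refl 1) 2 (by norm_num) (by have := padK_le t; omega)
  have hmax : max 1 (padK t) = padK t := Nat.max_eq_right (padK_pos t)
  rw [hmax] at hloop
  rw [hloop]
  by_cases hc : padK t ≤ 11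
  · rw [if_neg, Nat.min_eq_left hc]
    push Not
    calc (2:Int) ^ padK t ≤ 2 ^ 11 := pow_le_pow_right₀ (by norm_num) hc
      _ = 2048 := by norm_num
  · push Not at hc
    rw [if_pos, Nat.min_eq_right (by omega)]
    · norm_num
    · calc (2048 : Int) = 2 ^ 11 := by norm_num
        _ < 2 ^ padK t := by
          apply pow_lt_pow_right₀ (by norm_num) hc

lemma foldl_add_eq_sum_map (l : List (List (String × Int))) (f : List (String × Int) → Int) :
    ∀ (init : Int), l.foldl (fun acc info => acc + f info) init = init + (l.map f).sum := by
  induction l with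
  | nil => intro init; simp
  | cons x xs ih =>
    intro init
    simp [List.foldl_cons, ih]
    ring

-- ===== VERDICT (by name: the statement is the Claim_ definition above) =====
theorem calculate_atlas_size_spec : Claim_equal_calculate_atlas_size := by
  intro si _ _
  unfold Spec_calculate_atlas_size calculate_atlas_size calculate_atlas_size_alt
  simp only []
  rw [foldl_add_eq_sum_map, zero_add]
  set total := ((PySem.Dict.ofList si).values.map
    (fun info => (PySem.Dict.ofList info).getD "width" 0 * (PySem.Dict.ofList info).getD "height" 0)).sum with htotal
  set t := Int.tdiv (6 * total) 5 with ht
  rw [cap_eq t]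
  unfold padK
  split_ifs with h
  · norm_num
  · rfl
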